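-- pv_equiv track=rewrite | github.com/stephenchung27/old-python-leetcode | google_1.py | solution
-- ===== SOURCE A (Python) =====
-- def solution(A, B):
--     A_words = A.split(" ")
--     B_words = B.split(" ")
--
--     A_counts = []
--
--     for word in A_words:
--         smallest_letter = find_smallest_letter(word)
--         letter_occurrences = find_number_of_occurrences(word, smallest_letter)
--         A_counts.append(letter_occurrences)
--
--     B_counts = []
--
--     for word in B_words:
--         smallest_letter = find_smallest_letter(word)
--         letter_occurrences = find_number_of_occurrences(word, smallest_letter)
--         B_counts.append(letter_occurrences)
--
--     counts = [0] * len(B_words)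
--
--     for i in range(len(B_counts)):
--         word_count = B_counts[i]
--         for target_count in A_counts:
--             if target_count < word_count:
--                 counts[i] += 1
--
--     return [sum(target_count < word_count for target_count in A_counts) for word_count in B_counts]
--
--     return counts
--
-- def find_smallest_letter(word):
--     smallest = ord("z")
--     for letter in word:
--         smallest = min(smallest, ord(letter))
--     return chr(smallest)
--
-- def find_number_of_occurrences(word, target):
--     count = 0
--     for letter in word:
--         if letter == target:
--             count += 1
--     return count
-- ===== SOURCE B (Python) =====
-- def solution(A, B):
--     # B: precompute the key of every A-word once, sort those counts, and answer each
--     # B-word by binary search (number of A-counts strictly below it) instead of A's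
--     # nested scan over all A-counts for every B-word.
--     def key(word):
--         m = min(word + "z")
--         return sum(ch == m for ch in word)
--
--     a_sorted = sorted(key(w) for w in A.split(" "))
--     n = len(a_sorted)
--     res = []
--     for w in B.split(" "):
--         x = key(w)
--         lo, hi = 0, n
--         while lo < hi:
--             mid = (lo + hi) // 2
--             if a_sorted[mid] < x:
--                 lo = mid + 1
--             else:
--                 hi = mid
--         res.append(lo)
--     return res
-- ===== Notes on version B (the rewrite author's own statement) =====
-- stated objective: faster
-- what changed: Sorts the per-word smallest-letter counts of A once and answers each B-word with a hand-written binary search (bisect_left), replacing A's inner scan over all A-counts for every B-word.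
import Mathlib
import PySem

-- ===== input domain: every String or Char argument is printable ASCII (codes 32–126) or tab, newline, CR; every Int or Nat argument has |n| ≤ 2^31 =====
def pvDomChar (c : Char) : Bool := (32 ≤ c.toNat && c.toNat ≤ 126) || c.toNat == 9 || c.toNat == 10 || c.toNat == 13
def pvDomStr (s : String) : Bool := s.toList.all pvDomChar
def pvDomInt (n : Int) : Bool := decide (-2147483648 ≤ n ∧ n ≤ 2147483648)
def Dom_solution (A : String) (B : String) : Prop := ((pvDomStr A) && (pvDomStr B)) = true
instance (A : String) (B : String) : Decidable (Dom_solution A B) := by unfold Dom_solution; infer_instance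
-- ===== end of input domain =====

-- B sorts A's per-word counts once and binary-searches each B count instead of A's
-- nested scan: an asymptotically faster exact re-implementation, equal return value.

-- ===== PORT A =====
def findSmallestLetter (word : String) : Char :=
  Char.ofNat (word.toList.foldl (fun smallest letter => min smallest letter.toNat) 122)

def findNumberOfOccurrences (word : String) (target : Char) : Int :=
  word.toList.foldl (fun count letter => if letter = target then count + 1 else count) 0

def solution (A : String) (B : String) : List Int :=
  let A_words := (PySem.Str.split? A " ").getD []
  let B_words := (PySem.Str.split? B " ").getD []
  let A_counts := A_words.foldl (fun acc word =>
    let smallest_letter := findSmallestLetter word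
    let letter_occurrences := findNumberOfOccurrences word smallest_letter
    acc ++ [letter_occurrences]) []
  let B_counts := B_words.foldl (fun acc word =>
    let smallest_letter := findSmallestLetter word
    let letter_occurrences := findNumberOfOccurrences word smallest_letter
    acc ++ [letter_occurrences]) []
  -- the dead `counts` loop of A, executed and then discarded exactly as in the Python
  let _counts := (PySem.List.pyRange 0 (B_counts.length : Int) 1).foldl (fun cs i =>
    let word_count := PySem.List.pyGetD B_counts i 0
    A_counts.foldl (fun cs target_count =>
      if target_count < word_count then cs.set i.toNat (cs.getD i.toNat 0 + 1) else cs) cs)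
    (List.replicate B_words.length (0 : Int))
  B_counts.map (fun word_count =>
    (A_counts.map (fun target_count => if target_count < word_count then (1 : Int) else 0)).sum)

-- ===== PORT B =====
def keyAlt (word : String) : Int :=
  let m := (PySem.List.min? (word.toList ++ ['z']) (fun c => c)).getD 'z'
  word.toList.foldl (fun s ch => s + (if ch = m then 1 else 0)) 0

def bisectLoop (a : List Int) (x : Int) (lo hi : Nat) : Nat :=
  if lo < hi then
    if a.getD ((lo + hi) / 2) 0 < x then bisectLoop a x ((lo + hi) / 2 + 1) hi
    else bisectLoop a x lo ((lo + hi) / 2)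
  else lo
termination_by hi - lo
decreasing_by all_goals omega

def solution_alt (A : String) (B : String) : List Int :=
  let aSorted := PySem.List.sorted (((PySem.Str.split? A " ").getD []).map keyAlt) (fun x => x) false
  let n := aSorted.length
  ((PySem.Str.split? B " ").getD []).foldl (fun res w =>
    res ++ [(bisectLoop aSorted (keyAlt w) 0 n : Int)]) []

-- ===== PRECONDITION & SPEC =====
def Spec_solution (A : String) (B : String) (out : List Int) : Prop := out = solution_alt A B
instance (A : String) (B : String) (out : List Int) : Decidable (Spec_solution A B out) := by unfold Spec_solution; infer_instance

-- ===== CLAIM (what is proved, stated in full; the proofs are below) =====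
def Claim_equal_solution : Prop := ∀ (A : String) (B : String), Dom_solution A B → Spec_solution A B (solution A B)

-- ===== LEMMAS AND PROOFS =====

theorem char_toNat_min (a b : Char) : (min a b).toNat = min a.toNat b.toNat := by
  rcases le_total a b with h|h
  · have h' : a.toNat ≤ b.toNat := Fin.mk_le_mk.mp h
    rw [min_eq_left h]; omega
  · have h' : b.toNat ≤ a.toNat := Fin.mk_le_mk.mp h
    rw [min_eq_right h]; omega

theorem foldl_min_char_toNat (l : List Char) (ch : Char) :
    l.foldl (fun s c => min s c.toNat) ch.toNat = (l.foldl min ch).toNat := by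
  induction l generalizing ch with
  | nil => rfl
  | cons c t ih => simpa [char_toNat_min] using ih (min ch c)

theorem foldl_min_out {κ : Type} [LinearOrder κ] (l : List κ) (a b : κ) :
    min (l.foldl min a) b = l.foldl min (min a b) := by
  induction l generalizing a with
  | nil => rfl
  | cons c t ih =>
      simp only [List.foldl_cons]
      rw [ih]
      congr 1
      simp [min_comm, min_left_comm]

theorem minAlt_eq (l : List Char) :
    (PySem.List.min? (l ++ ['z']) (fun c => c)).getD 'z' = l.foldl min 'z' := by
  cases l with
  | nil => decide
  | cons c t =>
      rw [List.cons_append, PySem.List.min?_id_cons]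
      simp only [Option.getD_some, List.foldl_append, List.foldl_cons, List.foldl_nil]
      rw [foldl_min_out, min_comm]

theorem count_shape (l : List Char) (t : Char) (a : Int) :
    l.foldl (fun s ch => s + (if ch = t then 1 else 0)) a
      = l.foldl (fun c ch => if ch = t then c + 1 else c) a := by
  induction l generalizing a with
  | nil => rfl
  | cons c l ih => by_cases h : c = t <;> simp [h, ih]

theorem key_eq (w : String) :
    keyAlt w = findNumberOfOccurrences w (findSmallestLetter w) := by
  unfold keyAlt findNumberOfOccurrences findSmallestLetter
  rw [minAlt_eq]
  have h122 : (122 : Nat) = ('z' : Char).toNat := rfl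
  rw [h122, foldl_min_char_toNat, Char.ofNat_toNat, count_shape]

theorem bisect_idx {l : List Int} (hs : l.Pairwise (· ≤ ·)) (x : Int) (i : Nat)
    (hi : i < l.length) :
    (l[i] < x ↔ i < l.countP (fun t => decide (t < x))) := by
  induction l generalizing i with
  | nil => simp at hi
  | cons a t ih =>
      rcases List.pairwise_cons.mp hs with ⟨ha, ht⟩
      by_cases hax : a < x
      · cases i with
        | zero =>
            simp [hax]
        | succ j =>
            simp only [List.length_cons] at hi
            have := ih ht j (by omega)
            simp [hax]
            simpa using this
      · have hzero : t.countP (fun t => decide (t < x)) = 0 := by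
          rw [List.countP_eq_zero]
          intro y hy
          simp only [decide_eq_true_eq]
          exact not_lt.mpr (le_trans (not_lt.mp hax) (ha y hy))
        cases i with
        | zero => simp [hax, hzero]
        | succ j =>
            simp only [List.length_cons] at hi
            have hyt : ¬ t[j] < x :=
              not_lt.mpr (le_trans (not_lt.mp hax) (ha _ (List.getElem_mem _)))
            simp [hax, hzero, hyt]

theorem bisectLoop_eq {l : List Int} (hs : l.Pairwise (· ≤ ·)) (x : Int) (lo hi : Nat)
    (h1 : lo ≤ l.countP (fun t => decide (t < x)))
    (h2 : l.countP (fun t => decide (t < x)) ≤ hi) (h3 : hi ≤ l.length) :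
    bisectLoop l x lo hi = l.countP (fun t => decide (t < x)) := by
  by_cases h : lo < hi
  · rw [bisectLoop]
    simp only [h, if_true]
    have hmid : (lo + hi) / 2 < l.length := by omega
    rw [List.getD_eq_getElem l 0 hmid]
    by_cases hc : l[(lo + hi) / 2] < x
    · have := (bisect_idx hs x _ hmid).mp hc
      rw [if_pos hc]
      exact bisectLoop_eq hs x _ _ (by omega) h2 h3
    · have hk : l.countP (fun t => decide (t < x)) ≤ (lo + hi) / 2 :=
        not_lt.mp (fun h' => hc ((bisect_idx hs x _ hmid).mpr h'))
      rw [if_neg hc]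
      exact bisectLoop_eq hs x _ _ h1 hk (by omega)
  · rw [bisectLoop]
    simp only [h, if_false]
    omega
termination_by hi - lo
decreasing_by all_goals omega

-- ===== VERDICT (by name: the statement is the Claim_ definition above) =====
theorem solution_spec : Claim_equal_solution := by
  intro A B _
  unfold Spec_solution solution solution_alt
  simp only [PySem.List.foldl_append_singleton_eq_map, List.nil_append]
  have hkey : keyAlt = fun x => findNumberOfOccurrences x (findSmallestLetter x) :=
    funext key_eq
  rw [hkey, List.map_map]
  refine List.map_congr_left (fun w _ => ?_)
  have hperm := PySem.List.sorted_perm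
    (((PySem.Str.split? A " ").getD []).map
      (fun x => findNumberOfOccurrences x (findSmallestLetter x))) (fun x => x) false
  have hs := PySem.List.sorted_pairwise
    (((PySem.Str.split? A " ").getD []).map
      (fun x => findNumberOfOccurrences x (findSmallestLetter x))) (fun x => x)
  simp only [Function.comp_apply]
  rw [bisectLoop_eq hs _ 0 _ (Nat.zero_le _) List.countP_le_length le_rfl,
    hperm.countP_eq]
  have hf : (fun t => if t < findNumberOfOccurrences w (findSmallestLetter w) then (1:Int) else 0)
      = (fun t => if (decide (t < findNumberOfOccurrences w (findSmallestLetter w))) = true then (1:Int) else 0) := by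
    funext t; simp
  rw [hf, PySem.List.sum_map_ite_one_zero]
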